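-- pv_equiv track=rewrite | github.com/mustafaemirtezcan/BBM103 | BLIND VALLEY/blind_valley.py | control_neighbor
-- ===== SOURCE A (Python) =====
-- def control_neighbor(board_lines, column_number):  # This function checks if there are any letters that do not comply with the contiguity rules.
--     for sub_list in board_lines:  # It checks for errors located side by side.
--         for i in range(column_number):
--             if i + 1 < column_number:  # (If there is a column on the right side.)
--                 if sub_list[i] == sub_list[i + 1]:
--                     if sub_list[i] not in ["N", 'L', 'U', 'D', 'R']:  # (If it is different from these elements:["N", 'L', 'U', 'D', 'R'].)
--                         return False
--             if i - 1 > -1:  # (If there is a column on the left side.)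
--                 if sub_list[i] == sub_list[i - 1]:
--                     if sub_list[i] not in ["N", 'L', 'U', 'D', 'R']:
--                         return False
--
--     for n in range(len(board_lines)):  # It checks for errors located on top of each other.
--         for k in range(column_number):  # "len(board_lines)"  means number of row on board game.
--             if n + 1 < len(board_lines):  # (If there is a row below.)
--                 if board_lines[n][k] == board_lines[n + 1][k]:
--                     if board_lines[n][k] not in ["N", 'L', 'U', 'D', 'R']:
--                         return False
--             if n - 1 > -1:  # (If there is a row above.)
--                 if board_lines[n][k] == board_lines[n - 1][k]:
--                     if board_lines[n][k] not in ["N", 'L', 'U', 'D', 'R']: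
--                         return False
--
--     return True  # If there is no error.
-- ===== SOURCE B (Python) =====
-- ALLOWED = {"N", "L", "U", "D", "R"}
--
--
-- def control_neighbor(board_lines, column_number):
--     rows = len(board_lines)
--     for r in range(rows):
--         row = board_lines[r]
--         for c in range(column_number):
--             cell = row[c]
--             if cell in ALLOWED:
--                 continue
--             if c + 1 < column_number and row[c + 1] == cell:
--                 return False
--             if r + 1 < rows and board_lines[r + 1][c] == cell:
--                 return False
--     return True
-- ===== Notes on version B (the rewrite author's own statement) =====
-- stated objective: simpler
-- what changed: A's two separate passes (horizontal with redundant left+right checks, then vertical with redundant up+down checks) are collapsed into one row-major pass that checks each adjacent pair exactly once (right and down neighbor), skipping allowed letters up front.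
-- outside the precondition, e.g. on control_neighbor([[]], 1): A returns True, B raises IndexError; on control_neighbor([['A', 'A'], ['B']], 2): A returns False, B returns False
import Mathlib
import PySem

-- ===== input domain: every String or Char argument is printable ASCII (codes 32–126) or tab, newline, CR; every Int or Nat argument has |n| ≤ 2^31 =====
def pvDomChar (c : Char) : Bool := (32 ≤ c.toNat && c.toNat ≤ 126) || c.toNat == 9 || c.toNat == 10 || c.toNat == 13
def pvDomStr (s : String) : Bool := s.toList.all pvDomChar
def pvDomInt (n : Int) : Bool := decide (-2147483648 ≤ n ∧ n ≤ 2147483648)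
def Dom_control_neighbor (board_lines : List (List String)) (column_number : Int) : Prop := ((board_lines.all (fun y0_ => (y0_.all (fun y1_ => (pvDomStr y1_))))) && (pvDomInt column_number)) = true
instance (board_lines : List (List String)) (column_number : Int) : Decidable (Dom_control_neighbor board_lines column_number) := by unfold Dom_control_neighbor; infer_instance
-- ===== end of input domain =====

-- B merges A's two passes (horizontal with both left/right checks, then vertical with both
-- up/down checks) into one row-major pass checking each adjacent pair once (right and down).
-- Objective: simpler. Equivalence is about the return value on Pre_ (where Python A raises no IndexError).

-- ===== PORT A =====
def pvAllowed : List String := ["N", "L", "U", "D", "R"]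

def control_neighbor (board_lines : List (List String)) (column_number : Int) : Bool :=
  -- first loop: horizontal neighbours (right then left), early `return False`
  if board_lines.any (fun sub_list =>
      (PySem.List.pyRange 0 column_number 1).any (fun i =>
        (decide (i + 1 < column_number) &&
          (PySem.List.pyGetD sub_list i "" == PySem.List.pyGetD sub_list (i + 1) "" &&
            !(pvAllowed.contains (PySem.List.pyGetD sub_list i "")))) ||
        (decide (i - 1 > -1) &&
          (PySem.List.pyGetD sub_list i "" == PySem.List.pyGetD sub_list (i - 1) "" &&
            !(pvAllowed.contains (PySem.List.pyGetD sub_list i "")))))) then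
    false
  -- second loop: vertical neighbours (below then above), early `return False`
  else if (PySem.List.pyRange 0 (board_lines.length : Int) 1).any (fun n =>
      (PySem.List.pyRange 0 column_number 1).any (fun k =>
        (decide (n + 1 < (board_lines.length : Int)) &&
          (PySem.List.pyGetD (PySem.List.pyGetD board_lines n []) k "" ==
              PySem.List.pyGetD (PySem.List.pyGetD board_lines (n + 1) []) k "" &&
            !(pvAllowed.contains (PySem.List.pyGetD (PySem.List.pyGetD board_lines n []) k "")))) ||
        (decide (n - 1 > -1) &&
          (PySem.List.pyGetD (PySem.List.pyGetD board_lines n []) k "" ==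
              PySem.List.pyGetD (PySem.List.pyGetD board_lines (n - 1) []) k "" &&
            !(pvAllowed.contains (PySem.List.pyGetD (PySem.List.pyGetD board_lines n []) k "")))))) then
    false
  else
    true

-- ===== PORT B =====

def control_neighbor_alt (board_lines : List (List String)) (column_number : Int) : Bool :=
  let rows : Int := board_lines.length
  (PySem.List.pyRange 0 rows 1).all (fun r =>
    let row := PySem.List.pyGetD board_lines r []
    (PySem.List.pyRange 0 column_number 1).all (fun c =>
      let cell := PySem.List.pyGetD row c ""
      if pvAllowed.contains cell then true
      else if decide (c + 1 < column_number) && (PySem.List.pyGetD row (c + 1) "" == cell) then false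
      else if decide (r + 1 < rows) && (PySem.List.pyGetD (PySem.List.pyGetD board_lines (r + 1) []) c "" == cell) then false
      else true))

-- ===== PRECONDITION & SPEC =====
-- Pre_ excludes the short/ragged boards (a positive column_number exceeding some
-- row's length) on which B's unconditional cell read raises IndexError; A usually
-- raises there too, but can still return: False when an early violation precedes
-- the short row, or True when its neighbour guards never fire (a lone row with
-- column_number 1 is never indexed by A).
def Pre_control_neighbor (board_lines : List (List String)) (column_number : Int) : Prop :=
  column_number ≤ 0 ∨ ∀ row ∈ board_lines, column_number ≤ (row.length : Int)
instance (board_lines : List (List String)) (column_number : Int) : Decidable (Pre_control_neighbor board_lines column_number) := by unfold Pre_control_neighbor; infer_instance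

def pvWitness_control_neighbor : List (List String) × Int := ([["B", "N"], ["N", "B"]], 2)

def Spec_control_neighbor (board_lines : List (List String)) (column_number : Int) (out : Bool) : Prop := out = control_neighbor_alt board_lines column_number
instance (board_lines : List (List String)) (column_number : Int) (out : Bool) : Decidable (Spec_control_neighbor board_lines column_number out) := by unfold Spec_control_neighbor; infer_instance

-- ===== CLAIM (what is proved, stated in full; the proofs are below) =====
def Claim_equal_control_neighbor : Prop := ∀ (board_lines : List (List String)) (column_number : Int), Dom_control_neighbor board_lines column_number → Pre_control_neighbor board_lines column_number → Spec_control_neighbor board_lines column_number (control_neighbor board_lines column_number)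

-- ===== LEMMAS AND PROOFS =====

theorem control_neighbor_eq (b : List (List String)) (col : Int) :
    control_neighbor b col = control_neighbor_alt b col := by
  unfold control_neighbor control_neighbor_alt
  have hif : ∀ x y : Bool, (if x = true then false else if y = true then false else true) = !(x || y) := by decide
  rw [hif]
  rw [← Bool.not_inj_iff, Bool.not_not]
  rw [Bool.eq_iff_iff]
  simp only [Bool.or_eq_true, List.any_eq_true, PySem.List.mem_pyRange_one, Bool.and_eq_true,
    decide_eq_true_eq, beq_iff_eq, Bool.not_eq_true', List.all_eq_false, Bool.not_eq_true,
    Bool.ite_eq_false_distrib]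
  constructor
  · rintro (⟨sub, hsub, i, ⟨hi0, hic⟩, hbr⟩ | ⟨n, ⟨hn0, hnl⟩, k, ⟨hk0, hkc⟩, hbr⟩)
    · obtain ⟨r, hr, hbr'⟩ := List.mem_iff_getElem.mp hsub
      have hga : PySem.List.pyGetD b (↑r) [] = sub := by
        rw [PySem.List.pyGetD_natCast, List.getD_eq_getElem _ _ hr, hbr']
      rcases hbr with ⟨h1, heq, hcont⟩ | ⟨h1, heq, hcont⟩
      · refine ⟨↑r, ⟨by exact Int.natCast_nonneg _, by exact_mod_cast hr⟩, i, ⟨hi0, hic⟩, ?_⟩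
        rw [hga, if_neg (by simpa using hcont), if_pos ⟨h1, heq.symm⟩]
        trivial
      · refine ⟨↑r, ⟨by exact Int.natCast_nonneg _, by exact_mod_cast hr⟩, i - 1, ⟨by omega, by omega⟩, ?_⟩
        have hadd : i - 1 + 1 = i := by omega
        rw [hga, hadd, if_neg (by rw [← heq]; simpa using hcont), if_pos ⟨by omega, heq⟩]
        trivial
    · rcases hbr with ⟨h1, heq, hcont⟩ | ⟨h1, heq, hcont⟩
      · refine ⟨n, ⟨hn0, hnl⟩, k, ⟨hk0, hkc⟩, ?_⟩
        rw [if_neg (by simpa using hcont)]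
        by_cases hQ : k + 1 < col ∧ PySem.List.pyGetD (PySem.List.pyGetD b n []) (k + 1) "" = PySem.List.pyGetD (PySem.List.pyGetD b n []) k ""
        · rw [if_pos hQ]; trivial
        · rw [if_neg hQ, if_pos ⟨h1, heq.symm⟩]; trivial
      · refine ⟨n - 1, ⟨by omega, by omega⟩, k, ⟨hk0, hkc⟩, ?_⟩
        have hadd : n - 1 + 1 = n := by omega
        rw [hadd, if_neg (by rw [← heq]; simpa using hcont)]
        by_cases hQ : k + 1 < col ∧ PySem.List.pyGetD (PySem.List.pyGetD b (n-1) []) (k + 1) "" = PySem.List.pyGetD (PySem.List.pyGetD b (n-1) []) k ""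
        · rw [if_pos hQ]; trivial
        · rw [if_neg hQ, if_pos ⟨by omega, heq⟩]; trivial
  · rintro ⟨r, ⟨hr0, hrl⟩, c, ⟨hc0, hcc⟩, hin⟩
    by_cases hP : pvAllowed.contains (PySem.List.pyGetD (PySem.List.pyGetD b r []) c "") = true
    · rw [if_pos hP] at hin; exact absurd hin (by simp)
    rw [if_neg hP] at hin
    have hP' : pvAllowed.contains (PySem.List.pyGetD (PySem.List.pyGetD b r []) c "") = false := by
      simpa using hP
    by_cases hQ : c + 1 < col ∧ PySem.List.pyGetD (PySem.List.pyGetD b r []) (c + 1) "" = PySem.List.pyGetD (PySem.List.pyGetD b r []) c ""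
    · left
      refine ⟨PySem.List.pyGetD b r [], ?_, c, ⟨hc0, hcc⟩, Or.inl ⟨hQ.1, hQ.2.symm, hP'⟩⟩
      exact PySem.List.pyGetD_mem b [] ⟨by omega, hrl⟩
    rw [if_neg hQ] at hin
    by_cases hR : r + 1 < (b.length : Int) ∧ PySem.List.pyGetD (PySem.List.pyGetD b (r+1) []) c "" = PySem.List.pyGetD (PySem.List.pyGetD b r []) c ""
    · exact Or.inr ⟨r, ⟨hr0, hrl⟩, c, ⟨hc0, hcc⟩, Or.inl ⟨hR.1, hR.2.symm, hP'⟩⟩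
    · rw [if_neg hR] at hin; exact absurd hin (by simp)

-- ===== VERDICT (by name: the statement is the Claim_ definition above) =====
theorem control_neighbor_spec : Claim_equal_control_neighbor := by
  intro b c _ _
  unfold Spec_control_neighbor
  exact control_neighbor_eq b c
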